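-- pv_equiv track=rewrite | github.com/Mattlock0/NameGenerator | src/nameParser.py | diagraph_name_template
-- ===== SOURCE A (Python) =====
-- consonants = ['b', 'c', 'd', 'f', 'g', 'h', 'j', 'k', 'l', 'm', 'n', 'p', 'q', 'r', 's', 't', 'v', 'w', 'x', 'z']
--
-- diagraphs = ['sh', 'ch', 'wh', 'ck', 'th', 'ph']  # potentially create an if statement to catch these
--
-- def diagraph_name_template(name):
--     letters = ([*name])  # separate name into a list of letters
--     template = ""  # blank template
--     flag = False
--
--     for index, letter in enumerate(letters):
--         if flag:  # we just read in a diagraph, so skip this letter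
--             flag = False
--             continue
--
--         if index + 1 < len(letters):  # there is the potential for a diagraph
--             if letter + letters[index+1] in diagraphs:  # this pair of letters makes a diagraph
--                 template += 'c'  # it's just a consonant
--                 flag = True  # set the flag true so we don't doubly read in the letters
--                 continue
--
--         if letter.lower() in consonants:
--             template += 'c'
--         else:
--             template += 'v'
--
--     return template
-- ===== SOURCE B (Python) =====
-- DIGRAPHS = {'sh', 'ch', 'wh', 'ck', 'th', 'ph'}
-- CONSONANTS = set('bcdfghjklmnpqrstvwxz')
--
-- def diagraph_name_template(name):
--     # No digraph's second letter ('h'/'k') is any digraph's first letter, so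
--     # digraph matches can never overlap or chain: position i is consumed as the
--     # tail of a digraph exactly when the raw pair name[i-1]+name[i] matches,
--     # independent of any scan history.  So every position is classified locally
--     # from precomputed neighbour masks instead of by a stateful greedy scan.
--     start = [a + b in DIGRAPHS for a, b in zip(name, name[1:])] + [False]
--     prev = [False] + start[:-1]
--     return ''.join('c' if s else ('c' if ch.lower() in CONSONANTS else 'v')
--                    for ch, s, p in zip(name, start, prev) if not p)
-- ===== Notes on version B (the rewrite author's own statement) =====
-- stated objective: alternative
-- what changed: drops A's stateful greedy skip-flag scan entirely: because no digraph's second letter ('h'/'k') is any digraph's first letter, matches can never chain, so B precomputes a boolean pair-mask with zip and classifies every position locally and statelessly from the mask and its shifted copy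
import Mathlib
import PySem

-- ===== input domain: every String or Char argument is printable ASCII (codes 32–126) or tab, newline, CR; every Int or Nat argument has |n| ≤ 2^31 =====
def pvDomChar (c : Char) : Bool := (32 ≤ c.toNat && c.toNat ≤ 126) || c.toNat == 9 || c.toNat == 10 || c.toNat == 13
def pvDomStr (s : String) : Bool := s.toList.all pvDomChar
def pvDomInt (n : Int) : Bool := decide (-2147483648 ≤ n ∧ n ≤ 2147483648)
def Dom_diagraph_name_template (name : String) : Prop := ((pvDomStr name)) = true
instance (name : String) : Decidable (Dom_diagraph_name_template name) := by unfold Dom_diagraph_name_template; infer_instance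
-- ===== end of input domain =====

-- B replaces A's stateful skip-flag scan by stateless local classification: since no digraph's second letter is any digraph's first, matches cannot overlap, so precomputed neighbour masks (zip) decide every position independently; alternative, same cost.


-- shared module-level constants of the Python file
def pvConsonants : List Char :=
  ['b', 'c', 'd', 'f', 'g', 'h', 'j', 'k', 'l', 'm',
   'n', 'p', 'q', 'r', 's', 't', 'v', 'w', 'x', 'z']

def pvDiagraphs : List String := ["sh", "ch", "wh", "ck", "th", "ph"]

-- ===== PORT A =====
-- letter.lower() in consonants ? 'c' : 'v'
def diagraphACls (letter : Char) : Char :=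
  if PySem.Chars.lowerChar letter ∈ pvConsonants then 'c' else 'v'

-- A's loop: state = (template as char list, flag); lookahead letters[index+1] is the head of the remaining list
def diagraphALoop : List Char → Bool → List Char → List Char
  | [], _, t => t
  | _letter :: rest, true, t => diagraphALoop rest false t
  | letter :: rest, false, t =>
    match rest with
    | next :: rest' =>
      if String.ofList [letter, next] ∈ pvDiagraphs then
        diagraphALoop (next :: rest') true (t ++ ['c'])
      else
        diagraphALoop (next :: rest') false (t ++ [diagraphACls letter])
    | [] => diagraphALoop [] false (t ++ [diagraphACls letter])

def diagraph_name_template (name : String) : String :=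
  String.ofList (diagraphALoop name.toList false [])

-- ===== PORT B =====
-- start = [a + b in DIGRAPHS for a, b in zip(name, name[1:])] + [False]
def diagraphStarts (l : List Char) : List Bool :=
  ((l.zip l.tail).map (fun ab => decide (String.ofList [ab.1, ab.2] ∈ pvDiagraphs))) ++ [false]

-- the classification of a single character ('c' if ch.lower() in CONSONANTS else 'v')
def diagraphBCls (ch : Char) : Char :=
  if PySem.Chars.lowerChar ch ∈ pvConsonants then 'c' else 'v'

def diagraph_name_template_alt (name : String) : String :=
  let start := diagraphStarts name.toList
  let prev := false :: start.dropLast          -- [False] + start[:-1]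
  -- ''.join(… for ch, s, p in zip(name, start, prev) if not p)
  String.ofList (((name.toList.zip start).zip prev).filterMap
    (fun csp => if csp.2 then none else some (if csp.1.2 then 'c' else diagraphBCls csp.1.1)))

-- ===== PRECONDITION & SPEC =====
def Spec_diagraph_name_template (name : String) (out : String) : Prop := out = diagraph_name_template_alt name
instance (name : String) (out : String) : Decidable (Spec_diagraph_name_template name out) := by unfold Spec_diagraph_name_template; infer_instance

-- ===== CLAIM (what is proved, stated in full; the proofs are below) =====
def Claim_equal_diagraph_name_template : Prop := ∀ (name : String), Dom_diagraph_name_template name → Spec_diagraph_name_template name (diagraph_name_template name)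

-- ===== LEMMAS AND PROOFS =====

-- the reference shape both ports are reduced to: the greedy tokenization
def diagraphTokens : List Char → List (List Char)
  | [] => []
  | [a] => [[a]]
  | a :: b :: rest =>
    if String.ofList [a, b] ∈ pvDiagraphs then [a, b] :: diagraphTokens rest
    else [a] :: diagraphTokens (b :: rest)

def diagraphClassify (tok : List Char) : Char :=
  if tok.length == 2 then 'c'
  else if PySem.Chars.lowerChar (tok.headD ' ') ∈ pvConsonants then 'c' else 'v'

-- the pair mask without its trailing False
def diagraphS (l : List Char) : List Bool :=
  (l.zip l.tail).map (fun ab => decide (String.ofList [ab.1, ab.2] ∈ pvDiagraphs))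

-- no digraph's second letter ('h'/'k') is any digraph's first letter, so matches never chain
theorem diagraph_no_overlap (a b c : Char) (h : String.ofList [a, b] ∈ pvDiagraphs) :
    String.ofList [b, c] ∉ pvDiagraphs := by
  intro h2
  simp only [pvDiagraphs, List.mem_cons, List.not_mem_nil, or_false] at h h2
  rcases h with h | h | h | h | h | h <;> rcases h2 with h2 | h2 | h2 | h2 | h2 | h2 <;>
    · have t1 := congrArg String.toList h
      have t2 := congrArg String.toList h2
      simp at t1 t2
      simp_all

theorem diagraphALoop_eq_tokens (l : List Char) :
    ∀ (t : List Char), diagraphALoop l false t = t ++ (diagraphTokens l).map diagraphClassify := by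
  induction l using diagraphTokens.induct with
  | case1 => intro t; simp [diagraphALoop, diagraphTokens]
  | case2 a =>
      intro t
      simp [diagraphALoop, diagraphTokens, diagraphClassify, diagraphACls, List.headD]
  | case3 a b rest h ih =>
      intro t
      simp [diagraphALoop, diagraphTokens, h, ih, diagraphClassify, List.append_assoc]
  | case4 a b rest h ih =>
      intro t
      simp [diagraphALoop, diagraphTokens, h, ih, diagraphClassify, diagraphACls,
        List.headD, List.append_assoc]

theorem diagraphZ_eq_tokens (l : List Char) :
    ((l.zip (diagraphS l ++ [false])).zip (false :: diagraphS l)).filterMap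
      (fun csp => if csp.2 then none else some (if csp.1.2 then 'c' else diagraphBCls csp.1.1))
      = (diagraphTokens l).map diagraphClassify := by
  induction l using diagraphTokens.induct with
  | case1 => simp [diagraphS, diagraphTokens]
  | case2 a =>
      simp [diagraphS, diagraphTokens, diagraphClassify, diagraphBCls, List.headD]
  | case3 a b rest h ih =>
      cases rest with
      | nil => simp [diagraphS, diagraphTokens, h, diagraphClassify]
      | cons c rest' =>
          have hnc := diagraph_no_overlap a b c h
          simp only [diagraphS, List.tail_cons, List.zip_cons_cons, List.map_cons,
            List.cons_append, List.filterMap_cons, decide_eq_true_eq] at ih ⊢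
          simp [h, hnc, diagraphTokens, diagraphClassify, ih]
  | case4 a b rest h ih =>
      simp only [diagraphS, List.tail_cons, List.zip_cons_cons, List.map_cons,
        List.cons_append, List.filterMap_cons, decide_eq_true_eq] at ih ⊢
      simp only [diagraphBCls] at ih
      simp [h, diagraphTokens, diagraphClassify, diagraphBCls, List.headD, ih]

theorem diagraphStarts_eq (l : List Char) : diagraphStarts l = diagraphS l ++ [false] := rfl

theorem diagraphStarts_dropLast (l : List Char) :
    (diagraphStarts l).dropLast = diagraphS l := by
  rw [diagraphStarts_eq, List.dropLast_concat]

-- ===== VERDICT (by name: the statement is the Claim_ definition above) =====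
theorem diagraph_name_template_spec : Claim_equal_diagraph_name_template := by
  intro name _
  unfold Spec_diagraph_name_template diagraph_name_template diagraph_name_template_alt
  dsimp only
  rw [diagraphALoop_eq_tokens, diagraphStarts_dropLast, diagraphStarts_eq, diagraphZ_eq_tokens]
  simp
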